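-- pv_equiv track=rewrite | github.com/fmcooper/stable-SPA | stats/collect_results.py | getDegree
-- ===== SOURCE A (Python) =====
-- def getDegree(profile):
--     # average profile
--     if len(profile) == 0:
--         return -1
--     else:
--         count = 0
--         for i in reversed(profile):
--             if i == 0:
--                 count = count + 1;
--             if not i == 0:
--                 return len(profile) - count
--         return len(profile) - count
-- ===== SOURCE B (Python) =====
-- def getDegree(profile):
--     if len(profile) == 0:
--         return -1
--     result = 0
--     for i, x in enumerate(profile):
--         if x != 0:
--             result = i + 1
--     return result
-- ===== Notes on version B (the rewrite author's own statement) =====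
-- stated objective: alternative
-- what changed: Replaces A's end-to-start early-exit scan that counts trailing zeros with a single forward enumerate pass that remembers the position after the last nonzero element.
import Mathlib
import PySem

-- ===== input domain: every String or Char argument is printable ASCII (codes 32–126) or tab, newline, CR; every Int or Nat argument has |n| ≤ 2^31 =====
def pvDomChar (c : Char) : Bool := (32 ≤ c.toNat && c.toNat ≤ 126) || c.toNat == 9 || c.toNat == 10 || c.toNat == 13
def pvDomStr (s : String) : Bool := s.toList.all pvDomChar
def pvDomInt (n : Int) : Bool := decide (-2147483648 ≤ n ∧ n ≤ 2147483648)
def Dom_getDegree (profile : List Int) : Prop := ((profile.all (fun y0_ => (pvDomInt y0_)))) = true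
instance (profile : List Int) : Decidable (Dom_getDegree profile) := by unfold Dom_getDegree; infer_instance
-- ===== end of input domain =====

-- B replaces A's end-to-start early-exit trailing-zero count with a forward enumerate pass remembering the last nonzero position (alternative decomposition, same cost).
-- ===== PORT A =====
def getDegreeLoopA (n : Int) : List Int → Int → Int
  | [], count => n - count
  | i :: rest, count =>
    if i == 0 then getDegreeLoopA n rest (count + 1)
    else n - count

def getDegree (profile : List Int) : Int :=
  if profile.length == 0 then -1
  else getDegreeLoopA (profile.length : Int) profile.reverse 0

-- ===== PORT B =====
def getDegree_alt (profile : List Int) : Int :=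
  if profile.length == 0 then -1
  else (PySem.List.enumerate profile 0).foldl
    (fun r p => if p.2 ≠ 0 then p.1 + 1 else r) 0

-- ===== PRECONDITION & SPEC =====
def Spec_getDegree (profile : List Int) (out : Int) : Prop := out = getDegree_alt profile
instance (profile : List Int) (out : Int) : Decidable (Spec_getDegree profile out) := by unfold Spec_getDegree; infer_instance

-- ===== CLAIM (what is proved, stated in full; the proofs are below) =====
def Claim_equal_getDegree : Prop := ∀ (profile : List Int), Dom_getDegree profile → Spec_getDegree profile (getDegree profile)

-- ===== LEMMAS AND PROOFS =====
theorem tw_le (l : List Int) : (l.takeWhile (fun i => i == 0)).length ≤ l.length :=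
  (List.takeWhile_sublist _).length_le

theorem loopA_eq (n : Int) : ∀ (l : List Int) (c : Int),
    getDegreeLoopA n l c = n - c - ((l.takeWhile (fun i => i == 0)).length : Int) := by
  intro l
  induction l with
  | nil => intro c; simp [getDegreeLoopA]
  | cons i rest ih =>
    intro c
    by_cases h : i = 0
    · subst h
      simp only [getDegreeLoopA, List.takeWhile_cons]
      simp [ih, List.length_cons]
      omega
    · simp [getDegreeLoopA, h]

theorem foldB_eq : ∀ (xs : List Int),
    (PySem.List.enumerate xs 0).foldl (fun r p => if p.2 ≠ 0 then p.1 + 1 else r) 0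
      = (xs.length : Int) - ((xs.reverse.takeWhile (fun i => i == 0)).length : Int) := by
  intro xs
  induction xs using List.reverseRecOn with
  | nil => simp [PySem.List.enumerate]
  | append_singleton ys x ih =>
    rw [PySem.List.enumerate_append, List.foldl_append, ih]
    by_cases h : x = 0
    · subst h
      have ht : ((ys.reverse.takeWhile (fun i => i == 0)).length : Int) ≤ (ys.reverse.length : Int) :=
        Int.ofNat_le.mpr (tw_le ys.reverse)
      simp [PySem.List.enumerate]
    · simp [PySem.List.enumerate, h]

-- ===== VERDICT (by name: the statement is the Claim_ definition above) =====
theorem getDegree_spec : Claim_equal_getDegree := by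
  intro profile _
  unfold Spec_getDegree getDegree getDegree_alt
  by_cases hn : profile.length = 0
  · simp [hn]
  · simp only [hn, beq_iff_eq]
    rw [loopA_eq, foldB_eq]
    have ht : (profile.reverse.takeWhile (fun i => i == 0)).length ≤ profile.reverse.length :=
      tw_le profile.reverse
    simp at ht ⊢
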